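-- pv_equiv track=rewrite | github.com/SimuladorComunicacionesDigitales/SimuladorCD | Funciones_GUI.py | calcularAnchoBanda
-- ===== SOURCE A (Python) =====
-- def calcularAnchoBanda(tipoOnda, fSimb, nroSimb, freqs = [0,0,0,0], tipoSenalBBPB = 1):
--     """
--     Esta función calcula el ancho de banda práctico de la señal, a partir de los símbolos que la compone.
--
--     :param tipoOnda: Vector con los tipo de onda de cada símbolo.
--     :param fSimb: Frecuencia de símbolo.
--     :param nroSimb: Número de símbolos que compone la señal.
--     :param freqs: Vector con las frecuencia de portadora de la señal.
--     :param tipoSenalBBPB: Flag que indica si la señal es bandabase o pasabanda.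
--     :return: Ancho de banda práctico de la señal.
--     """
--
--     # senalBBPB = 1 Bandabase, senalBBPB = 2 Pasabanda, senalBBPB = 0 ambas.
--     tipoOnda1,tipoOnda2,tipoOnda3,tipoOnda4 = tipoOnda
--
--     #Si la señal es Pasabanda (opción 2 o 0) organizo las frecuencias.
--     if tipoSenalBBPB != 1:
--         frecuencias = [*set(freqs)] #quita los elementos repetidos
--
--         for i in range(len(frecuencias)):
--             if frecuencias[i]==0:
--                 frecuencias.pop(i)
--                 break
--
--         frecuencias.sort()
--         numFreq = len(frecuencias)
--
--     if nroSimb == 2: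
--         anchoBanda = fSimb
--         if tipoOnda1==2 or tipoOnda1==3 or tipoOnda1==6 or tipoOnda2==2 or tipoOnda2==3 or tipoOnda2==6:
--             anchoBanda = 2 * fSimb
--         if tipoOnda1==5 or tipoOnda1==7 or tipoOnda2==5 or tipoOnda2==7:
--             anchoBanda = 4 * fSimb
--
--
--     elif nroSimb ==3:
--         anchoBanda = fSimb
--         if tipoOnda1==2 or tipoOnda1==3 or tipoOnda1==6 or tipoOnda2==2 or tipoOnda2==3 or tipoOnda2==6 or tipoOnda3==2 or tipoOnda3==3 or tipoOnda3==6: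
--             anchoBanda = 2 * fSimb
--         if tipoOnda1==5 or tipoOnda1==7 or tipoOnda2==5 or tipoOnda2==7 or tipoOnda3==5 or tipoOnda3==7:
--             anchoBanda = 4 * fSimb
--
--     else:
--         anchoBanda = fSimb
--         if tipoOnda1==2 or tipoOnda1==3 or tipoOnda1==6 or tipoOnda2==2 or tipoOnda2==3 or tipoOnda2==6 or tipoOnda3==2 or tipoOnda3==3 or tipoOnda3==6 or tipoOnda4==2 or tipoOnda4==3 or tipoOnda4==6:
--             anchoBanda = 2 * fSimb
--         if tipoOnda1==5 or tipoOnda1==7 or tipoOnda2==5 or tipoOnda2==7 or tipoOnda3==5 or tipoOnda3==7 or tipoOnda4==5 or tipoOnda4==7: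
--             anchoBanda = 4 * fSimb
--
--     if tipoSenalBBPB == 2:
--         if numFreq == 1:
--             anchoBanda = 2 * anchoBanda
--         else:
--             anchoBanda = (frecuencias[1]-frecuencias[0]) + (2*anchoBanda)
--
--     if tipoSenalBBPB == 0:
--         anchoBanda = frecuencias[0]+anchoBanda
--
--     return anchoBanda
-- ===== SOURCE B (Python) =====
-- def calcularAnchoBanda(tipoOnda, fSimb, nroSimb, freqs = [0,0,0,0], tipoSenalBBPB = 1):
--     # Numeric-weight formulation: each wave type maps to a bandwidth multiplier and the
--     # signal takes the largest one; the passband tail uses the two smallest distinct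
--     # nonzero frequencies found by direct min scans (no set, no sort, no pop loop).
--     a, b, c, d = tipoOnda
--     waves = (a, b) if nroSimb == 2 else (a, b, c) if nroSimb == 3 else (a, b, c, d)
--     anchoBanda = fSimb * max(4 if o in (5, 7) else 2 if o in (2, 3, 6) else 1 for o in waves)
--     if tipoSenalBBPB == 2 or tipoSenalBBPB == 0:
--         m1 = min(f for f in freqs if f != 0)
--         if tipoSenalBBPB == 0:
--             anchoBanda = m1 + anchoBanda
--         else:
--             resto = [f for f in freqs if f != 0 and f != m1]
--             if not resto:
--                 anchoBanda = 2 * anchoBanda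
--             else:
--                 anchoBanda = (min(resto) - m1) + 2 * anchoBanda
--     return anchoBanda
-- ===== Notes on version B (the rewrite author's own statement) =====
-- stated objective: alternative
-- what changed: B computes the base bandwidth arithmetically as fSimb times the maximum per-wave multiplier (4/2/1) instead of A's three unrolled override if-chains, and replaces A's set-dedup/pop-first-zero-loop/sort passband machinery by two direct min scans over the raw freqs list (first minimum nonzero, then minimum of the values above it), never building a deduplicated or sorted list.
import Mathlib
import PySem

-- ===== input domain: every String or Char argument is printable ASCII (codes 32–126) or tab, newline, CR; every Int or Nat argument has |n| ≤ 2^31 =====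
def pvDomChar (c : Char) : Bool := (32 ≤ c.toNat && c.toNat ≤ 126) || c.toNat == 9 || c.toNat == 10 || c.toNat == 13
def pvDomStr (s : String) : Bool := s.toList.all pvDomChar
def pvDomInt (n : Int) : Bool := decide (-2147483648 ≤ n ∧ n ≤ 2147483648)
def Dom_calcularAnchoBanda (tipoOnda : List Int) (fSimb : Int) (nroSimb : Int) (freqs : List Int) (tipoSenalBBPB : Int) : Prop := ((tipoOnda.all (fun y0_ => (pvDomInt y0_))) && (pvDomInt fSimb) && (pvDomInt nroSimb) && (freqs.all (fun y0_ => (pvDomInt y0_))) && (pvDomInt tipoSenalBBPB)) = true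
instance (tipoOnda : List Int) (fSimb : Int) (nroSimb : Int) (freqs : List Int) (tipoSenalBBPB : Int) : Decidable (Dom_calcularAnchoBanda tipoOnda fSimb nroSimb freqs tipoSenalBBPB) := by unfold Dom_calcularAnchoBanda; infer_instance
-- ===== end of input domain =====

-- B replaces A's unrolled override branches by "multiply fSimb by the maximum per-wave weight"
-- and A's dedup/pop-zero/sort passband machinery by two direct min scans (no set, no sort).


-- ===== PORT A =====
-- A's for-loop 'for i in range(len(l)): if l[i]==0: l.pop(i); break' scans left to right, removes
-- the first 0 and stops; ported as the equivalent structural recursion.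
def pyPopFirstZero : List Int → List Int
  | [] => []
  | x :: xs => if x = 0 then xs else x :: pyPopFirstZero xs

def calcularAnchoBanda (tipoOnda : List Int) (fSimb : Int) (nroSimb : Int) (freqs : List Int) (tipoSenalBBPB : Int) : Int :=
  match tipoOnda with
  | [tipoOnda1, tipoOnda2, tipoOnda3, tipoOnda4] =>
    -- frecuencias as computed when tipoSenalBBPB != 1 (unused otherwise)
    let frecuencias : List Int :=
      PySem.List.sorted (pyPopFirstZero (PySem.Set.ofList freqs)) (fun x => x) false
    let anchoBanda : Int :=
      if nroSimb = 2 then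
        let ab := fSimb
        let ab := if tipoOnda1 == 2 || tipoOnda1 == 3 || tipoOnda1 == 6 || tipoOnda2 == 2 || tipoOnda2 == 3 || tipoOnda2 == 6 then 2 * fSimb else ab
        if tipoOnda1 == 5 || tipoOnda1 == 7 || tipoOnda2 == 5 || tipoOnda2 == 7 then 4 * fSimb else ab
      else if nroSimb = 3 then
        let ab := fSimb
        let ab := if tipoOnda1 == 2 || tipoOnda1 == 3 || tipoOnda1 == 6 || tipoOnda2 == 2 || tipoOnda2 == 3 || tipoOnda2 == 6 || tipoOnda3 == 2 || tipoOnda3 == 3 || tipoOnda3 == 6 then 2 * fSimb else ab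
        if tipoOnda1 == 5 || tipoOnda1 == 7 || tipoOnda2 == 5 || tipoOnda2 == 7 || tipoOnda3 == 5 || tipoOnda3 == 7 then 4 * fSimb else ab
      else
        let ab := fSimb
        let ab := if tipoOnda1 == 2 || tipoOnda1 == 3 || tipoOnda1 == 6 || tipoOnda2 == 2 || tipoOnda2 == 3 || tipoOnda2 == 6 || tipoOnda3 == 2 || tipoOnda3 == 3 || tipoOnda3 == 6 || tipoOnda4 == 2 || tipoOnda4 == 3 || tipoOnda4 == 6 then 2 * fSimb else ab
        if tipoOnda1 == 5 || tipoOnda1 == 7 || tipoOnda2 == 5 || tipoOnda2 == 7 || tipoOnda3 == 5 || tipoOnda3 == 7 || tipoOnda4 == 5 || tipoOnda4 == 7 then 4 * fSimb else ab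
    let anchoBanda : Int :=
      if tipoSenalBBPB = 2 then
        if frecuencias.length = 1 then 2 * anchoBanda
        else ((PySem.List.pyGet? frecuencias 1).getD 0 - (PySem.List.pyGet? frecuencias 0).getD 0) + 2 * anchoBanda  -- index 1 in range under Pre_
      else anchoBanda
    if tipoSenalBBPB = 0 then (PySem.List.pyGet? frecuencias 0).getD 0 + anchoBanda  -- in range under Pre_
    else anchoBanda
  | _ => 0  -- length-4 unpack raises ValueError; excluded by Pre_

-- ===== PORT B =====
-- B's 'a, b, c, d = tipoOnda' (none on any other length = ValueError, excluded by Pre_)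
def bUnpack4 (l : List Int) : Option (Int × Int × Int × Int) :=
  if l.length = 4 then some (l.getD 0 0, l.getD 1 0, l.getD 2 0, l.getD 3 0) else none

def calcularAnchoBanda_alt (tipoOnda : List Int) (fSimb : Int) (nroSimb : Int) (freqs : List Int) (tipoSenalBBPB : Int) : Int :=
  match bUnpack4 tipoOnda with
  | some (a, b, c, d) =>
    let waves : List Int := if nroSimb = 2 then [a, b] else if nroSimb = 3 then [a, b, c] else [a, b, c, d]
    -- max(4 if o in (5,7) else 2 if o in (2,3,6) else 1 for o in waves); waves nonempty so getD is never hit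
    let anchoBanda : Int :=
      fSimb * ((PySem.List.max? (waves.map (fun o => if o == 5 || o == 7 then (4 : Int) else if o == 2 || o == 3 || o == 6 then 2 else 1)) (fun x => x)).getD 0)
    if tipoSenalBBPB = 2 ∨ tipoSenalBBPB = 0 then
      -- min(f for f in freqs if f != 0); some under Pre_, getD never hit there
      let m1 : Int := (PySem.List.min? (freqs.filter (fun f => f != 0)) (fun x => x)).getD 0
      if tipoSenalBBPB = 0 then m1 + anchoBanda
      else
        let resto := freqs.filter (fun f => f != 0 && f != m1)
        if resto = [] then 2 * anchoBanda
        else ((PySem.List.min? resto (fun x => x)).getD 0 - m1) + 2 * anchoBanda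
    else anchoBanda
  | none => 0  -- length-4 unpack raises ValueError; excluded by Pre_

-- ===== PRECONDITION & SPEC =====
-- Pre_ excludes exactly the inputs where Python A raises: a tipoOnda whose length is not 4
-- (ValueError on the unpack), and a passband request (tipoSenalBBPB = 2 or 0) with no nonzero
-- frequency (IndexError on frecuencias[1]/frecuencias[0]).
def Pre_calcularAnchoBanda (tipoOnda : List Int) (fSimb : Int) (nroSimb : Int) (freqs : List Int) (tipoSenalBBPB : Int) : Prop :=
  tipoOnda.length = 4 ∧ ((tipoSenalBBPB = 2 ∨ tipoSenalBBPB = 0) → ∃ f ∈ freqs, f ≠ 0)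
instance (tipoOnda : List Int) (fSimb : Int) (nroSimb : Int) (freqs : List Int) (tipoSenalBBPB : Int) : Decidable (Pre_calcularAnchoBanda tipoOnda fSimb nroSimb freqs tipoSenalBBPB) := by unfold Pre_calcularAnchoBanda; infer_instance
def pvWitness_calcularAnchoBanda : List Int × Int × Int × List Int × Int := ([1, 5, 2, 0], 3, 2, [10, 0, 20], 2)
def Spec_calcularAnchoBanda (tipoOnda : List Int) (fSimb : Int) (nroSimb : Int) (freqs : List Int) (tipoSenalBBPB : Int) (out : Int) : Prop := out = calcularAnchoBanda_alt tipoOnda fSimb nroSimb freqs tipoSenalBBPB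
instance (tipoOnda : List Int) (fSimb : Int) (nroSimb : Int) (freqs : List Int) (tipoSenalBBPB : Int) (out : Int) : Decidable (Spec_calcularAnchoBanda tipoOnda fSimb nroSimb freqs tipoSenalBBPB out) := by unfold Spec_calcularAnchoBanda; infer_instance

-- ===== CLAIM (what is proved, stated in full; the proofs are below) =====
def Claim_equal_calcularAnchoBanda : Prop := ∀ (tipoOnda : List Int) (fSimb : Int) (nroSimb : Int) (freqs : List Int) (tipoSenalBBPB : Int), Dom_calcularAnchoBanda tipoOnda fSimb nroSimb freqs tipoSenalBBPB → Pre_calcularAnchoBanda tipoOnda fSimb nroSimb freqs tipoSenalBBPB → Spec_calcularAnchoBanda tipoOnda fSimb nroSimb freqs tipoSenalBBPB (calcularAnchoBanda tipoOnda fSimb nroSimb freqs tipoSenalBBPB)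

-- ===== LEMMAS AND PROOFS =====

def pvPeso (o : Int) : Int := if o == 5 || o == 7 then 4 else if o == 2 || o == 3 || o == 6 then 2 else 1

def pvW (l : List Int) : Int :=
  if l.any (fun o => o == 5 || o == 7) then 4 else if l.any (fun o => o == 2 || o == 3 || o == 6) then 2 else 1

theorem pvPeso_ge_one (o : Int) : 1 ≤ pvPeso o := by
  unfold pvPeso; split_ifs <;> norm_num

theorem pvW_cons (x : Int) (t : List Int) : pvW (x :: t) = max (pvPeso x) (pvW t) := by
  unfold pvW pvPeso
  by_cases h1 : x == 5 || x == 7 <;> by_cases h2 : x == 2 || x == 3 || x == 6 <;>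
    simp [h1, h2, List.any_cons] <;> split_ifs <;> omega

theorem foldl_max_pvPeso (t : List Int) : ∀ acc : Int, 1 ≤ acc →
    (t.map pvPeso).foldl max acc = max acc (pvW t) := by
  induction t with
  | nil => intro acc h; unfold pvW; simp; omega
  | cons x xs ih =>
    intro acc h
    simp only [List.map_cons, List.foldl_cons]
    rw [ih (max acc (pvPeso x)) (le_trans h (le_max_left _ _)), pvW_cons]
    omega

theorem max?_map_pvPeso (x : Int) (t : List Int) :
    (PySem.List.max? ((x :: t).map pvPeso) (fun y => y)).getD 0 = pvW (x :: t) := by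
  rw [List.map_cons, PySem.List.max?_id_cons]
  simp only [Option.getD_some]
  rw [foldl_max_pvPeso t (pvPeso x) (pvPeso_ge_one x), pvW_cons]

-- On a duplicate-free list (as set(freqs) is), removing the first 0 is filtering out 0.
theorem pyPopFirstZero_eq_filter (l : List Int) (h : l.Nodup) :
    pyPopFirstZero l = l.filter (fun x => !(x == 0)) := by
  induction l with
  | nil => rfl
  | cons x xs ih =>
    rcases List.nodup_cons.mp h with ⟨hx, hxs⟩
    by_cases hx0 : x = 0
    · subst hx0
      simp [pyPopFirstZero, List.filter]
      exact (List.filter_eq_self.mpr (fun a ha => by simp; rintro rfl; exact hx ha)).symm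
    · have hb : (x == 0) = false := by simp [hx0]
      simp [pyPopFirstZero, hx0, ih hxs, List.filter, hb]

-- membership of A's frecuencias list
theorem mem_frecuencias (freqs : List Int) (x : Int) :
    x ∈ PySem.List.sorted (pyPopFirstZero (PySem.Set.ofList freqs)) (fun y => y) false
      ↔ x ∈ freqs ∧ x ≠ 0 := by
  rw [PySem.List.mem_sorted, pyPopFirstZero_eq_filter _ (PySem.Set.nodup_ofList freqs)]
  simp [List.mem_filter, PySem.Set.mem_ofList]

theorem frecuencias_pairwise_lt (freqs : List Int) :
    (PySem.List.sorted (pyPopFirstZero (PySem.Set.ofList freqs)) (fun y => y) false).Pairwise (· < ·) := by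
  have hnd : (pyPopFirstZero (PySem.Set.ofList freqs)).Nodup := by
    rw [pyPopFirstZero_eq_filter _ (PySem.Set.nodup_ofList freqs)]
    exact (PySem.Set.nodup_ofList freqs).filter _
  have hle := PySem.List.sorted_pairwise (pyPopFirstZero (PySem.Set.ofList freqs)) (fun y => y)
  have hnd' : (PySem.List.sorted (pyPopFirstZero (PySem.Set.ofList freqs)) (fun y => y) false).Nodup :=
    (PySem.List.sorted_perm (pyPopFirstZero (PySem.Set.ofList freqs)) (fun y => y) false).nodup_iff.mpr hnd
  exact (hle.and hnd').imp (fun ⟨h1, h2⟩ => lt_of_le_of_ne h1 h2)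

-- B's m1 is the head of A's frecuencias (both are the minimum nonzero frequency)
theorem head_frecuencias (freqs : List Int) (m1 h : Int) (t : List Int)
    (hm : PySem.List.min? (freqs.filter (fun f => f != 0)) (fun x => x) = some m1)
    (hL : PySem.List.sorted (pyPopFirstZero (PySem.Set.ofList freqs)) (fun y => y) false = h :: t) :
    h = m1 := by
  have hm1mem : m1 ∈ freqs.filter (fun f => f != 0) := PySem.List.min?_mem hm
  have hm1min := PySem.List.min?_isMin hm
  have hhmem : h ∈ freqs ∧ h ≠ 0 := (mem_frecuencias freqs h).mp (by rw [hL]; simp)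
  have hh_le : h ≤ m1 := by
    have hmem : m1 ∈ pyPopFirstZero (PySem.Set.ofList freqs) := by
      rw [List.mem_filter] at hm1mem
      rw [pyPopFirstZero_eq_filter _ (PySem.Set.nodup_ofList freqs), List.mem_filter]
      exact ⟨(PySem.Set.mem_ofList _ _).mpr hm1mem.1, by simpa using hm1mem.2⟩
    simpa using PySem.List.key_head_sorted_le _ _ hL m1 hmem
  have hm1_le : m1 ≤ h := hm1min h (by rw [List.mem_filter]; exact ⟨hhmem.1, by simpa using hhmem.2⟩)
  omega


theorem bUnpack4_cons (a b c d : Int) : bUnpack4 [a, b, c, d] = some (a, b, c, d) := rfl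

theorem max?_map_peso (x : Int) (t : List Int) :
    (PySem.List.max? ((x :: t).map (fun o => if o == 5 || o == 7 then (4 : Int) else if o == 2 || o == 3 || o == 6 then 2 else 1)) (fun y => y)).getD 0 = pvW (x :: t) :=
  max?_map_pvPeso x t

theorem resto_nil_iff (freqs : List Int) (m1 : Int) (t : List Int)
    (hL : PySem.List.sorted (pyPopFirstZero (PySem.Set.ofList freqs)) (fun y => y) false = m1 :: t) :
    (freqs.filter (fun f => f != 0 && f != m1)) = [] ↔ t = [] := by
  constructor
  · intro hnil
    by_contra ht
    obtain ⟨y, t', rfl⟩ := List.exists_cons_of_ne_nil ht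
    have hy2 := (mem_frecuencias freqs y).mp (by rw [hL]; simp)
    have hpw := frecuencias_pairwise_lt freqs
    rw [hL] at hpw
    have hlt : m1 < y := (List.pairwise_cons.mp hpw).1 y (by simp)
    have hmem : y ∈ freqs.filter (fun f => f != 0 && f != m1) :=
      List.mem_filter.mpr ⟨hy2.1, by simp [bne_iff_ne]; exact ⟨hy2.2, by omega⟩⟩
    rw [hnil] at hmem; simp at hmem
  · intro ht; subst ht
    rw [List.filter_eq_nil_iff]
    intro f hf
    simp only [Bool.and_eq_true, bne_iff_ne, ne_eq, not_and, not_not]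
    intro hf0
    have : f ∈ PySem.List.sorted (pyPopFirstZero (PySem.Set.ofList freqs)) (fun y => y) false :=
      (mem_frecuencias freqs f).mpr ⟨hf, hf0⟩
    rw [hL] at this; simpa using this

theorem second_min (freqs : List Int) (m1 y m2 : Int) (t' : List Int)
    (hL : PySem.List.sorted (pyPopFirstZero (PySem.Set.ofList freqs)) (fun y => y) false = m1 :: y :: t')
    (hm2 : PySem.List.min? (freqs.filter (fun f => f != 0 && f != m1)) (fun x => x) = some m2) :
    m2 = y := by
  have hpw := frecuencias_pairwise_lt freqs
  rw [hL] at hpw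
  have h1 := List.pairwise_cons.mp hpw
  have h2 := List.pairwise_cons.mp h1.2
  have hymem := (mem_frecuencias freqs y).mp (by rw [hL]; simp)
  have hym1 : m1 < y := h1.1 y (by simp)
  have hm2mem := PySem.List.min?_mem hm2
  rw [List.mem_filter] at hm2mem
  have hm2p : m2 ≠ 0 ∧ m2 ≠ m1 := by
    have := hm2mem.2; simp only [Bool.and_eq_true, bne_iff_ne] at this; exact this
  have hm2L : m2 ∈ PySem.List.sorted (pyPopFirstZero (PySem.Set.ofList freqs)) (fun y => y) false :=
    (mem_frecuencias freqs m2).mpr ⟨hm2mem.1, hm2p.1⟩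
  rw [hL] at hm2L
  have hy_le : y ≤ m2 := by
    rcases List.mem_cons.mp hm2L with h | h
    · exact absurd h hm2p.2
    · rcases List.mem_cons.mp h with h' | h'
      · exact le_of_eq h'.symm
      · exact le_of_lt (h2.1 m2 h')
  have hle : m2 ≤ y := by
    have := PySem.List.min?_isMin hm2 y
      (List.mem_filter.mpr ⟨hymem.1, by simp [bne_iff_ne]; exact ⟨hymem.2, by omega⟩⟩)
    simpa using this
  omega

-- ===== VERDICT (by name: the statement is the Claim_ definition above) =====
theorem calcularAnchoBanda_spec : Claim_equal_calcularAnchoBanda := by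
  intro tipoOnda fSimb nroSimb freqs tipoSenalBBPB _ hpre
  obtain ⟨hlen, hfr⟩ := hpre
  match tipoOnda, hlen with
  | [t1, t2, t3, t4], _ =>
    have hbase :
        (if nroSimb = 2 then
          (if t1 == 5 || t1 == 7 || t2 == 5 || t2 == 7 then 4 * fSimb
           else if t1 == 2 || t1 == 3 || t1 == 6 || t2 == 2 || t2 == 3 || t2 == 6 then 2 * fSimb else fSimb)
         else if nroSimb = 3 then
          (if t1 == 5 || t1 == 7 || t2 == 5 || t2 == 7 || t3 == 5 || t3 == 7 then 4 * fSimb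
           else if t1 == 2 || t1 == 3 || t1 == 6 || t2 == 2 || t2 == 3 || t2 == 6 || t3 == 2 || t3 == 3 || t3 == 6 then 2 * fSimb else fSimb)
         else
          (if t1 == 5 || t1 == 7 || t2 == 5 || t2 == 7 || t3 == 5 || t3 == 7 || t4 == 5 || t4 == 7 then 4 * fSimb
           else if t1 == 2 || t1 == 3 || t1 == 6 || t2 == 2 || t2 == 3 || t2 == 6 || t3 == 2 || t3 == 3 || t3 == 6 || t4 == 2 || t4 == 3 || t4 == 6 then 2 * fSimb else fSimb))
        = fSimb * ((PySem.List.max? ((if nroSimb = 2 then [t1, t2] else if nroSimb = 3 then [t1, t2, t3] else [t1, t2, t3, t4]).map (fun o => if o == 5 || o == 7 then (4 : Int) else if o == 2 || o == 3 || o == 6 then 2 else 1)) (fun x => x)).getD 0) := by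
      by_cases h2 : nroSimb = 2
      · subst h2
        rw [if_pos (show (2 : Int) = 2 from rfl), if_pos (show (2 : Int) = 2 from rfl), max?_map_peso]
        unfold pvW
        simp only [List.any_cons, List.any_nil, Bool.or_false, Bool.or_assoc]
        split_ifs <;> ring
      · by_cases h3 : nroSimb = 3
        · subst h3
          rw [if_neg h2, if_neg h2, if_pos (show (3 : Int) = 3 from rfl), if_pos (show (3 : Int) = 3 from rfl), max?_map_peso]
          unfold pvW
          simp only [List.any_cons, List.any_nil, Bool.or_false, Bool.or_assoc]
          split_ifs <;> ring
        · rw [if_neg h2, if_neg h2, if_neg h3, if_neg h3, max?_map_peso]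
          unfold pvW
          simp only [List.any_cons, List.any_nil, Bool.or_false, Bool.or_assoc]
          split_ifs <;> ring
    simp only [Spec_calcularAnchoBanda, calcularAnchoBanda, calcularAnchoBanda_alt, bUnpack4_cons]
    rw [hbase]
    by_cases hs2 : tipoSenalBBPB = 2
    · subst hs2
      obtain ⟨f0, hf0, hf0n⟩ := hfr (Or.inl rfl)
      have hFne : freqs.filter (fun f => f != 0) ≠ [] := by
        intro hnil
        have hmem : f0 ∈ freqs.filter (fun f => f != 0) :=
          List.mem_filter.mpr ⟨hf0, by simpa using hf0n⟩
        rw [hnil] at hmem; simp at hmem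
      obtain ⟨m1, hm1⟩ : ∃ m, PySem.List.min? (freqs.filter (fun f => f != 0)) (fun x => x) = some m := by
        cases h : PySem.List.min? (freqs.filter (fun f => f != 0)) (fun x => x) with
        | none => exact absurd ((PySem.List.min?_eq_none_iff _ _).mp h) hFne
        | some m => exact ⟨m, rfl⟩
      have hf0L : f0 ∈ PySem.List.sorted (pyPopFirstZero (PySem.Set.ofList freqs)) (fun x => x) false :=
        (mem_frecuencias freqs f0).mpr ⟨hf0, hf0n⟩
      obtain ⟨hd, t, hL⟩ := List.exists_cons_of_ne_nil (List.ne_nil_of_mem hf0L)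
      have hh := head_frecuencias freqs m1 hd t hm1 hL
      rw [hh] at hL
      rw [hL, hm1]
      simp only [Option.getD_some]
      by_cases ht : t = []
      · subst ht
        have hres : freqs.filter (fun f => f != 0 && f != m1) = [] := (resto_nil_iff freqs m1 [] hL).mpr rfl
        rw [if_pos hres, if_pos (show ([m1] : List Int).length = 1 from rfl)]
        simp
      · obtain ⟨y, t', rfl⟩ := List.exists_cons_of_ne_nil ht
        have hresne : freqs.filter (fun f => f != 0 && f != m1) ≠ [] := by
          intro hnil
          exact absurd ((resto_nil_iff freqs m1 (y :: t') hL).mp hnil) (by simp)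
        obtain ⟨m2, hm2⟩ : ∃ m, PySem.List.min? (freqs.filter (fun f => f != 0 && f != m1)) (fun x => x) = some m := by
          cases h' : PySem.List.min? (freqs.filter (fun f => f != 0 && f != m1)) (fun x => x) with
          | none => exact absurd ((PySem.List.min?_eq_none_iff _ _).mp h') hresne
          | some m => exact ⟨m, rfl⟩
        have hm2y := second_min freqs m1 y m2 t' hL hm2
        rw [hm2y] at hm2
        have g1 : PySem.List.pyGet? (m1 :: y :: t') (1 : Int) = some y := by
          simp [PySem.List.pyGet?, PySem.List.pyIdx?]
        have g0 : PySem.List.pyGet? (m1 :: y :: t') (0 : Int) = some m1 := by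
          simp [PySem.List.pyGet?, PySem.List.pyIdx?, show (0 : Int) ≤ (t'.length : Int) + 1 by positivity]
        have hlen1 : ¬ (m1 :: y :: t').length = 1 := by simp
        rw [if_neg hresne, if_neg hlen1, hm2, g0, g1]
        simp
    · by_cases hs0 : tipoSenalBBPB = 0
      · subst hs0
        obtain ⟨f0, hf0, hf0n⟩ := hfr (Or.inr rfl)
        have hFne : freqs.filter (fun f => f != 0) ≠ [] := by
          intro hnil
          have hmem : f0 ∈ freqs.filter (fun f => f != 0) :=
            List.mem_filter.mpr ⟨hf0, by simpa using hf0n⟩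
          rw [hnil] at hmem; simp at hmem
        obtain ⟨m1, hm1⟩ : ∃ m, PySem.List.min? (freqs.filter (fun f => f != 0)) (fun x => x) = some m := by
          cases h : PySem.List.min? (freqs.filter (fun f => f != 0)) (fun x => x) with
          | none => exact absurd ((PySem.List.min?_eq_none_iff _ _).mp h) hFne
          | some m => exact ⟨m, rfl⟩
        have hf0L : f0 ∈ PySem.List.sorted (pyPopFirstZero (PySem.Set.ofList freqs)) (fun x => x) false :=
          (mem_frecuencias freqs f0).mpr ⟨hf0, hf0n⟩
        obtain ⟨hd, t, hL⟩ := List.exists_cons_of_ne_nil (List.ne_nil_of_mem hf0L)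
        have hh := head_frecuencias freqs m1 hd t hm1 hL
        rw [hh] at hL
        rw [hL, hm1]
        have g0 : PySem.List.pyGet? (m1 :: t) (0 : Int) = some m1 := by
          simp [PySem.List.pyGet?, PySem.List.pyIdx?, show (0 : Int) ≤ (t.length : Int) by positivity]
        rw [g0]
        simp
      · simp [hs2, hs0]
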